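-- pv_equiv track=rewrite | github.com/VedatAlpGoktepe/leetcode-solutions | 1297 - Maximum Number of Occurrences of a Substring.py | maxFreq
-- ===== SOURCE A (Python) =====
-- def maxFreq(s: str, maxLetters: int, minSize: int, maxSize: int) -> int:
--   sub_counts = dict([('',0)])
--   i = minSize
--   for j in range(len(s)-i+1):
--     cur_chunk = s[j:j+i]
--     if len(set(cur_chunk)) > maxLetters:
--       continue
--     sub_counts[cur_chunk] = sub_counts.get(cur_chunk, 0) + 1
--   return max(sub_counts.values())
-- ===== SOURCE B (Python) =====
-- def maxFreq(s, maxLetters, minSize, maxSize):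
--     # Sliding window: maintain char frequencies + distinct count in O(1) per step
--     # (maxSize is irrelevant to the answer and ignored, as in the original).
--     n = len(s)
--     if minSize < 1 or minSize > n:
--         return 0
--     freq = {}
--     distinct = 0
--     for c in s[:minSize]:
--         if freq.get(c, 0) == 0:
--             distinct += 1
--         freq[c] = freq.get(c, 0) + 1
--     counts = {}
--     best = 0
--     j = 0
--     if distinct <= maxLetters:
--         w0 = s[0:minSize]
--         c0 = counts.get(w0, 0) + 1
--         counts[w0] = c0
--         best = c0
--     for out, inc in zip(s, s[minSize:]):
--         j += 1
--         freq[out] -= 1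
--         if freq[out] == 0:
--             distinct -= 1
--         if freq.get(inc, 0) == 0:
--             distinct += 1
--         freq[inc] = freq.get(inc, 0) + 1
--         if distinct <= maxLetters:
--             w = s[j:j+minSize]
--             c = counts.get(w, 0) + 1
--             counts[w] = c
--             if c > best:
--                 best = c
--     return best
-- ===== Notes on version B (the rewrite author's own statement) =====
-- stated objective: alternative
-- what changed: Replaces A's per-window set() construction and final max() over the dict with a persistent sliding window (character-frequency dict plus an O(1)-maintained distinct counter over zip(s, s[minSize:])) and a running maximum.
-- intended difference: On inputs with minSize <= 0 and maxLetters >= 0, A counts empty (and negative-index-wrapped) slices as qualifying windows and returns a positive count (e.g. len(s)+1 for minSize=0), while B returns 0 because no substring of non-positive length exists, which is the intended answer. — e.g. on maxFreq("aba", 2, 0, 3): A returns 4, B returns 0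
import Mathlib
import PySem

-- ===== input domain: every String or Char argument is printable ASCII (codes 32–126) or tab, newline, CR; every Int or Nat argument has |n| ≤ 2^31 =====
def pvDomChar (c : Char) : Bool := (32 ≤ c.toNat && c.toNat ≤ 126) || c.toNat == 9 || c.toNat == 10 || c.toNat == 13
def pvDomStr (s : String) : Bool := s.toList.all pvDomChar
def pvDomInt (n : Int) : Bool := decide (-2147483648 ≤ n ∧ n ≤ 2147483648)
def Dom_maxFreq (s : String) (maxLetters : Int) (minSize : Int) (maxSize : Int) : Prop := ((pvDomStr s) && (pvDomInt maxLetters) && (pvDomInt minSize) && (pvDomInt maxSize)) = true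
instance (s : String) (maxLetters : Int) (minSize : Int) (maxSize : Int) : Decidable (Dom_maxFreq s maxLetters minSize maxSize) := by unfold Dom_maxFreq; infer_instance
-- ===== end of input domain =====

-- B replaces the per-window set() scan with a persistent sliding window (char-frequency
-- dict + O(1) distinct counter over zip(s, s[minSize:])) and a running maximum.

-- ===== PORT A =====
def maxFreq (s : String) (maxLetters : Int) (minSize : Int) (maxSize : Int) : Int :=
  let cs := s.toList
  let subCounts : PySem.Dict String Int := PySem.Dict.ofList [("", 0)]
  let i := minSize
  let d := (PySem.List.pyRange 0 ((cs.length : Int) - i + 1) 1).foldl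
    (fun d j =>
      let curChunk := PySem.List.slice cs (some j) (some (j + i))
      if ((PySem.Set.ofList curChunk).length : Int) > maxLetters then d
      else d.insert (String.ofList curChunk) (d.getD (String.ofList curChunk) 0 + 1))
    subCounts
  match PySem.List.max? d.values (fun v => v) with
  | some m => m
  | none => 0    -- unreachable: the seeded dict has at least one value

-- ===== PORT B =====
-- B-side helper: the body of B's sliding-window loop (one step per pair of zip(s, s[minSize:])).
-- freq[out] -= 1 is transliterated with getD 0: out is always a key of freq when the loop runs.
def pvBstep (cs : List Char) (maxLetters : Int) (minSize : Int)
    (st : PySem.Dict Char Int × Int × PySem.Dict String Int × Int × Int) (oi : Char × Char) :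
    PySem.Dict Char Int × Int × PySem.Dict String Int × Int × Int :=
  match st, oi with
  | (freq, distinct, counts, best, j), (out, inc) =>
    let j := j + 1
    let freq := freq.insert out (freq.getD out 0 - 1)
    let distinct := if freq.getD out 0 == 0 then distinct - 1 else distinct
    let distinct := if freq.getD inc 0 == 0 then distinct + 1 else distinct
    let freq := freq.insert inc (freq.getD inc 0 + 1)
    if distinct ≤ maxLetters then
      let w := String.ofList (PySem.List.slice cs (some j) (some (j + minSize)))
      let c := counts.getD w 0 + 1
      let counts := counts.insert w c
      let best := if c > best then c else best
      (freq, distinct, counts, best, j)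
    else
      (freq, distinct, counts, best, j)

def maxFreq_alt (s : String) (maxLetters : Int) (minSize : Int) (maxSize : Int) : Int :=
  let cs := s.toList
  let n : Int := cs.length
  if minSize < 1 || n < minSize then 0
  else
    let fd := (PySem.List.slice cs none (some minSize)).foldl
      (fun (p : PySem.Dict Char Int × Int) c =>
        (p.1.insert c (p.1.getD c 0 + 1), if p.1.getD c 0 == 0 then p.2 + 1 else p.2))
      (PySem.Dict.empty, 0)
    let st0 : PySem.Dict String Int × Int :=
      if fd.2 ≤ maxLetters then
        let w0 := String.ofList (PySem.List.slice cs (some 0) (some minSize))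
        let c0 := (PySem.Dict.empty : PySem.Dict String Int).getD w0 0 + 1
        (PySem.Dict.empty.insert w0 c0, c0)
      else (PySem.Dict.empty, 0)
    let res := (List.zip cs (PySem.List.slice cs (some minSize) none)).foldl
      (pvBstep cs maxLetters minSize) (fd.1, fd.2, st0.1, st0.2, 0)
    res.2.2.2.1

-- ===== PRECONDITION & SPEC =====
-- On inputs with minSize ≤ 0 and maxLetters ≥ 0, A counts empty (and negative-index-wrapped)
-- slices as qualifying windows and returns a positive count (e.g. len(s)+1 for minSize = 0),
-- while B returns 0 because no substring of non-positive length exists — the intended answer.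
def D_maxFreq (s : String) (maxLetters : Int) (minSize : Int) (maxSize : Int) : Prop :=
  minSize ≤ 0 ∧ 0 ≤ maxLetters
instance (s : String) (maxLetters : Int) (minSize : Int) (maxSize : Int) : Decidable (D_maxFreq s maxLetters minSize maxSize) := by unfold D_maxFreq; infer_instance

def Spec_maxFreq (s : String) (maxLetters : Int) (minSize : Int) (maxSize : Int) (out : Int) : Prop := ¬ D_maxFreq s maxLetters minSize maxSize → out = maxFreq_alt s maxLetters minSize maxSize
instance (s : String) (maxLetters : Int) (minSize : Int) (maxSize : Int) (out : Int) : Decidable (Spec_maxFreq s maxLetters minSize maxSize out) := by unfold Spec_maxFreq; infer_instance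

def pvDiffWitness_maxFreq : String × Int × Int × Int := ("aba", 2, 0, 3)
def pvDiffWitnessOut_maxFreq : Int × Int := (4, 0)

-- ===== CLAIM (what is proved, stated in full; the proofs are below) =====
def Claim_unchanged_maxFreq : Prop := ∀ (s : String) (maxLetters : Int) (minSize : Int) (maxSize : Int), Dom_maxFreq s maxLetters minSize maxSize → Spec_maxFreq s maxLetters minSize maxSize (maxFreq s maxLetters minSize maxSize)
def Claim_changed_maxFreq : Prop := Dom_maxFreq (pvDiffWitness_maxFreq.1) (pvDiffWitness_maxFreq.2.1) (pvDiffWitness_maxFreq.2.2.1) (pvDiffWitness_maxFreq.2.2.2) ∧ D_maxFreq (pvDiffWitness_maxFreq.1) (pvDiffWitness_maxFreq.2.1) (pvDiffWitness_maxFreq.2.2.1) (pvDiffWitness_maxFreq.2.2.2) ∧ maxFreq (pvDiffWitness_maxFreq.1) (pvDiffWitness_maxFreq.2.1) (pvDiffWitness_maxFreq.2.2.1) (pvDiffWitness_maxFreq.2.2.2) = pvDiffWitnessOut_maxFreq.1 ∧ maxFreq_alt (pvDiffWitness_maxFreq.1) (pvDiffWitness_maxFreq.2.1) (pvDiffWitness_maxFreq.2.2.1)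 (pvDiffWitness_maxFreq.2.2.2) = pvDiffWitnessOut_maxFreq.2 ∧ pvDiffWitnessOut_maxFreq.1 ≠ pvDiffWitnessOut_maxFreq.2
def Claim_exact_maxFreq : Prop := ∀ (s : String) (maxLetters : Int) (minSize : Int) (maxSize : Int), Dom_maxFreq s maxLetters minSize maxSize → D_maxFreq s maxLetters minSize maxSize → maxFreq s maxLetters minSize maxSize ≠ maxFreq_alt s maxLetters minSize maxSize

-- ===== LEMMAS AND PROOFS =====

-- the window of length m starting at position k
def pvWin (cs : List Char) (m k : Nat) : List Char := (cs.drop k).take m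

-- A's loop body, restated over natural window indices (no seed entry)
def pvAstep (cs : List Char) (maxLetters : Int) (m : Nat) (d : PySem.Dict String Int) (k : Nat) : PySem.Dict String Int :=
  if ((PySem.Set.ofList (pvWin cs m k)).length : Int) > maxLetters then d
  else d.insert (String.ofList (pvWin cs m k)) (d.getD (String.ofList (pvWin cs m k)) 0 + 1)

-- max(0, max of the list) — the value Python's max returns on 0 :: vs
def pvMv (vs : List Int) : Int := vs.foldl max 0

lemma pvFoldlMaxComm (l : List Int) (a b : Int) : l.foldl max (max a b) = max (l.foldl max a) b := by
  induction l generalizing a with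
  | nil => rfl
  | cons x t ih => simp only [List.foldl_cons]; rw [max_right_comm, ih]

-- number of distinct elements: len(set(l)) is l.toFinset.card
lemma pvSetLen (l : List Char) : (PySem.Set.ofList l).length = l.toFinset.card := by
  have h1 := PySem.Set.nodup_ofList l
  have h2 : (PySem.Set.ofList l).toFinset = l.toFinset := by
    ext x; simp [List.mem_toFinset, PySem.Set.mem_ofList]
  rw [← List.toFinset_card_of_nodup h1, h2]

lemma pvCardSnoc (l : List Char) (a : Char) :
    (l ++ [a]).toFinset.card = if a ∈ l then l.toFinset.card else l.toFinset.card + 1 := by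
  rw [List.toFinset_append]
  simp only [List.toFinset_cons, List.toFinset_nil, insert_empty_eq]
  rw [Finset.union_singleton]
  split_ifs with h
  · exact Finset.card_insert_of_mem (List.mem_toFinset.mpr h)
  · exact Finset.card_insert_of_notMem (fun hc => h (List.mem_toFinset.mp hc))

lemma pvCardCons (l : List Char) (a : Char) :
    (a :: l).toFinset.card = if a ∈ l then l.toFinset.card else l.toFinset.card + 1 := by
  rw [List.toFinset_cons]
  split_ifs with h
  · exact Finset.card_insert_of_mem (List.mem_toFinset.mpr h)
  · exact Finset.card_insert_of_notMem (fun hc => h (List.mem_toFinset.mp hc))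

lemma pvStringNe (l : List Char) (h : l ≠ []) : String.ofList l ≠ "" := by
  intro he; apply h
  have := congrArg String.toList he; simpa using this

-- pvMv after a counting insert: the running max update is exact
lemma pvMv_insert (d : PySem.Dict String Int) (k : String) (x : Int)
    (hnd : d.keys.Nodup) (hx : d.getD k 0 < x) :
    pvMv ((d.insert k x).values) = max (pvMv d.values) x := by
  by_cases hc : d.contains k
  · have hk : k ∈ d.keys := (PySem.Dict.contains_iff_mem_keys d k).mp hc
    unfold PySem.Dict.keys at hk hnd
    obtain ⟨p, hp, hpk⟩ := List.mem_map.mp hk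
    obtain ⟨l₁, l₂, hsplit⟩ := List.append_of_mem hp
    have hpe : p = (k, p.2) := by rw [← hpk]
    rw [hpe] at hsplit
    rw [hsplit] at hnd
    simp only [List.map_append, List.map_cons, List.nodup_append, List.nodup_cons] at hnd
    have h1 : ∀ q ∈ l₁, q.1 ≠ k := by
      intro q hq he
      exact hnd.2.2 q.1 (List.mem_map_of_mem hq) k (List.mem_cons_self) he
    have h2 : ∀ q ∈ l₂, q.1 ≠ k := by
      intro q hq he
      exact hnd.2.1.1 (he ▸ List.mem_map_of_mem hq)
    have hgd : d.getD k 0 = p.2 := by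
      simp only [PySem.Dict.getD, PySem.Dict.get?, hsplit, List.find?_append]
      rw [List.find?_eq_none.mpr (by intro q hq; simpa using h1 q hq)]
      simp
    rw [hgd] at hx
    simp only [PySem.Dict.insert, hc, if_true, PySem.Dict.values, pvMv, hsplit]
    simp only [List.map_append, List.map_cons]
    have hmap1 : List.map ((fun x : String × Int => x.2) ∘ fun p => if (p.1 == k) = true then (k, x) else p) l₁ = List.map (fun x : String × Int => x.2) l₁ := by
      apply List.map_congr_left; intro q hq
      simp [h1 q hq]
    have hmap2 : List.map ((fun x : String × Int => x.2) ∘ fun p => if (p.1 == k) = true then (k, x) else p) l₂ = List.map (fun x : String × Int => x.2) l₂ := by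
      apply List.map_congr_left; intro q hq
      simp [h2 q hq]
    simp only [List.map_map]
    rw [hmap1, hmap2]
    simp only [beq_self_eq_true, if_true]
    rw [List.foldl_append, List.foldl_append]
    simp only [List.foldl_cons]
    rw [pvFoldlMaxComm, pvFoldlMaxComm, max_assoc, max_eq_right hx.le]
  · simp only [PySem.Dict.insert]
    rw [if_neg hc]
    simp only [PySem.Dict.values, pvMv]
    rw [List.map_append, List.foldl_append]
    simp

-- the first-window loop builds the histogram and distinct count of its input
lemma pvFirstWin (l : List Char) :
    (∀ c : Char, ((l.foldl (fun (p : PySem.Dict Char Int × Int) c =>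
        (p.1.insert c (p.1.getD c 0 + 1), if p.1.getD c 0 == 0 then p.2 + 1 else p.2))
        (PySem.Dict.empty, 0)).1.getD c 0) = (l.count c : Int)) ∧
    ((l.foldl (fun (p : PySem.Dict Char Int × Int) c =>
        (p.1.insert c (p.1.getD c 0 + 1), if p.1.getD c 0 == 0 then p.2 + 1 else p.2))
        (PySem.Dict.empty, 0)).2 = (l.toFinset.card : Int)) := by
  induction l using List.reverseRecOn with
  | nil => refine ⟨fun c => ?_, ?_⟩ <;> simp [PySem.Dict.getD, PySem.Dict.get?, PySem.Dict.empty]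
  | append_singleton l a ih =>
    obtain ⟨ih1, ih2⟩ := ih
    rw [List.foldl_append] at *
    simp only [List.foldl_cons, List.foldl_nil]
    constructor
    · intro c
      rw [PySem.Dict.getD_insert]
      split_ifs with h
      · rw [h, ih1 a, List.count_append]
        simp
      · rw [ih1 c, List.count_append]
        simp [List.count_singleton, h, Ne.symm h]
    · rw [ih1 a]
      have : ((l.count a : Int) == 0) = decide (a ∉ l) := by
        rcases Bool.eq_false_or_eq_true (decide (a ∉ l)) with h | h <;>
          simp_all [List.count_eq_zero]
      rw [this, pvCardSnoc]
      by_cases h : a ∈ l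
      · rw [if_neg (by simp [h]), if_pos h, ih2]
      · rw [if_pos (by simp [h]), if_neg h, ih2]
        push_cast
        ring

-- A's fold with the ('',0) seed is the seedless fold with ('',0) prefixed (all real keys are nonempty)
lemma pvPadStep (cs : List Char) (maxLetters : Int) (m k : Nat)
    (hne : pvWin cs m k ≠ []) (d : PySem.Dict String Int) :
    pvAstep cs maxLetters m (PySem.Dict.mk (("", 0) :: d.items)) k
      = PySem.Dict.mk (("", 0) :: (pvAstep cs maxLetters m d k).items) := by
  unfold pvAstep
  split_ifs with h
  · rfl
  · have hw : ("" == String.ofList (pvWin cs m k)) = false :=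
      beq_eq_false_iff_ne.mpr (Ne.symm (pvStringNe _ hne))
    have hcont : (PySem.Dict.mk (("", (0:Int)) :: d.items)).contains (String.ofList (pvWin cs m k))
        = d.contains (String.ofList (pvWin cs m k)) := by
      simp [PySem.Dict.contains, hw]
    have hgd : (PySem.Dict.mk (("", (0:Int)) :: d.items)).getD (String.ofList (pvWin cs m k)) 0
        = d.getD (String.ofList (pvWin cs m k)) 0 := by
      simp [PySem.Dict.getD, PySem.Dict.get?, List.find?, hw]
    rw [hgd]
    simp only [PySem.Dict.insert, hcont]
    by_cases hc : d.contains (String.ofList (pvWin cs m k))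
    · simp only [hc, if_true]
      congr 1
      simp only [List.map_cons, hw, Bool.false_eq_true, if_false]
    · simp [hc]

lemma pvPad (cs : List Char) (maxLetters : Int) (m : Nat) (ks : List Nat)
    (hne : ∀ k ∈ ks, pvWin cs m k ≠ []) (d : PySem.Dict String Int) :
    ks.foldl (pvAstep cs maxLetters m) (PySem.Dict.mk (("", 0) :: d.items))
      = PySem.Dict.mk (("", 0) :: (ks.foldl (pvAstep cs maxLetters m) d).items) := by
  induction ks generalizing d with
  | nil => rfl
  | cons k t ih =>
    simp only [List.foldl_cons]
    rw [pvPadStep cs maxLetters m k (hne k List.mem_cons_self) d]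
    exact ih (fun x hx => hne x (List.mem_cons_of_mem _ hx)) _

-- main sliding-window invariant: from a correct state at window t, B's remaining loop
-- computes the running max of A's remaining fold
lemma pvBloop (cs : List Char) (maxLetters : Int) (m : Nat) (hm : 1 ≤ m) (hmn : m ≤ cs.length)
    (r : Nat) : ∀ (t : Nat), t + r = cs.length - m →
    ∀ (freq : PySem.Dict Char Int) (distinct : Int) (counts : PySem.Dict String Int) (best : Int),
    (∀ c : Char, freq.getD c 0 = ((pvWin cs m t).count c : Int)) →
    distinct = ((pvWin cs m t).toFinset.card : Int) →
    counts.keys.Nodup →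
    best = pvMv counts.values →
    (((cs.zip (cs.drop m)).drop t).foldl (pvBstep cs maxLetters (m : Int))
        (freq, distinct, counts, best, (t : Int))).2.2.2.1
      = pvMv ((List.range' (t+1) r).foldl (pvAstep cs maxLetters m) counts).values := by
  induction r with
  | zero =>
    intro t ht freq distinct counts best hf hd hnd hb
    have hlen : (cs.zip (cs.drop m)).length = cs.length - m := by
      rw [List.length_zip, List.length_drop]; omega
    rw [List.drop_eq_nil_of_le (by omega), List.foldl_nil]
    simpa using hb
  | succ r ih =>
    intro t ht freq distinct counts best hf hd hnd hb
    have hn : m ≤ cs.length := hmn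
    have htn : t < cs.length := by omega
    have hz : t < (cs.zip (cs.drop m)).length := by
      rw [List.length_zip, List.length_drop]; omega
    have hdm : t < (cs.drop m).length := by rw [List.length_drop]; omega
    rw [List.drop_eq_getElem_cons hz, List.getElem_zip, List.getElem_drop, List.foldl_cons]
    set out := cs[t] with hout_def
    set inc := cs[m + t] with hinc_def
    obtain ⟨m', hm'⟩ : ∃ m', m = m' + 1 := ⟨m - 1, by omega⟩
    set mid := (cs.drop (t+1)).take m' with hmid_def
    have e1 : pvWin cs m t = out :: mid := by
      unfold pvWin
      rw [List.drop_eq_getElem_cons htn, hm', List.take_succ_cons]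
    have e2 : pvWin cs m (t+1) = mid ++ [inc] := by
      unfold pvWin
      rw [hm', List.take_succ]
      congr 1
      have hlt : m' < (cs.drop (t+1)).length := by rw [List.length_drop]; omega
      rw [List.getElem?_eq_getElem hlt, List.getElem_drop]
      simp only [hinc_def, Option.toList_some]
      congr 2
      omega
    -- evaluate one step of B
    rw [e1] at hf hd
    have hf1 : ∀ c : Char, (freq.insert out (freq.getD out 0 - 1)).getD c 0 = (mid.count c : Int) := by
      intro c
      rw [PySem.Dict.getD_insert]
      split_ifs with h
      · rw [h, hf out, List.count_cons_self]
        push_cast; ring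
      · rw [hf c]
        simp [List.count_cons, h, Ne.symm h]
    have hd1 : (if (freq.insert out (freq.getD out 0 - 1)).getD out 0 == 0 then distinct - 1 else distinct)
        = (mid.toFinset.card : Int) := by
      rw [hf1 out, hd, pvCardCons]
      by_cases h : out ∈ mid
      · rw [if_neg (by simpa [List.count_eq_zero] using h), if_pos h]
      · rw [if_pos (by simpa [List.count_eq_zero] using h), if_neg h]
        push_cast; ring
    have hd2 : (if (freq.insert out (freq.getD out 0 - 1)).getD inc 0 == 0
          then (if (freq.insert out (freq.getD out 0 - 1)).getD out 0 == 0 then distinct - 1 else distinct) + 1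
          else (if (freq.insert out (freq.getD out 0 - 1)).getD out 0 == 0 then distinct - 1 else distinct))
        = ((pvWin cs m (t+1)).toFinset.card : Int) := by
      rw [hd1, hf1 inc, e2, pvCardSnoc]
      by_cases h : inc ∈ mid
      · rw [if_neg (by simpa [List.count_eq_zero] using h), if_pos h]
      · rw [if_pos (by simpa [List.count_eq_zero] using h), if_neg h]
        push_cast; ring
    have hf2 : ∀ c : Char,
        ((freq.insert out (freq.getD out 0 - 1)).insert inc ((freq.insert out (freq.getD out 0 - 1)).getD inc 0 + 1)).getD c 0
          = ((pvWin cs m (t+1)).count c : Int) := by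
      intro c
      rw [PySem.Dict.getD_insert, e2]
      split_ifs with h
      · rw [hf1 inc, h, List.count_append, List.count_singleton]
        simp
      · rw [hf1 c, List.count_append, List.count_singleton]
        simp [Ne.symm h]
    -- evaluate the step and branch on the window qualification
    simp only [pvBstep]
    rw [hd2]
    have hj : (t : Int) + 1 = ((t + 1 : Nat) : Int) := by push_cast; ring
    have hw : String.ofList (PySem.List.slice cs (some ((t : Int) + 1)) (some ((t : Int) + 1 + (m : Int))))
        = String.ofList (pvWin cs m (t+1)) := by
      rw [hj, PySem.List.slice_natCast_add]
      rfl
    rw [List.range'_succ, List.foldl_cons]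
    by_cases hq : ((pvWin cs m (t+1)).toFinset.card : Int) ≤ maxLetters
    · rw [if_pos hq, hw, hj]
      have hA : pvAstep cs maxLetters m counts (t+1)
          = counts.insert (String.ofList (pvWin cs m (t+1)))
              (counts.getD (String.ofList (pvWin cs m (t+1))) 0 + 1) := by
        unfold pvAstep
        rw [if_neg (by rw [pvSetLen]; omega)]
      rw [hA]
      have hnd' := PySem.Dict.nodup_keys_insert counts (String.ofList (pvWin cs m (t+1)))
        (counts.getD (String.ofList (pvWin cs m (t+1))) 0 + 1) hnd
      have hbest : (if counts.getD (String.ofList (pvWin cs m (t+1))) 0 + 1 > best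
            then counts.getD (String.ofList (pvWin cs m (t+1))) 0 + 1 else best)
          = pvMv ((counts.insert (String.ofList (pvWin cs m (t+1)))
              (counts.getD (String.ofList (pvWin cs m (t+1))) 0 + 1)).values) := by
        rw [pvMv_insert counts _ _ hnd (by omega), ← hb]
        rw [max_def]
        split_ifs <;> omega
      rw [hbest]
      exact ih (t+1) (by omega) _ _ _ _ hf2 rfl hnd' rfl
    · rw [if_neg hq, hj]
      have hA : pvAstep cs maxLetters m counts (t+1) = counts := by
        unfold pvAstep
        rw [if_pos (by rw [pvSetLen]; omega)]
      rw [hA]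
      exact ih (t+1) (by omega) _ _ _ _ hf2 rfl hnd hb

-- the agreement on the main domain (1 ≤ minSize ≤ len(s))
lemma pvWin0 (cs : List Char) (m : Nat) : pvWin cs m 0 = List.take m cs := by
  simp [pvWin]

lemma pvMain (s : String) (maxLetters minSize maxSize : Int)
    (h1 : 1 ≤ minSize) (h2 : minSize ≤ (s.toList.length : Int)) :
    maxFreq s maxLetters minSize maxSize = maxFreq_alt s maxLetters minSize maxSize := by
  obtain ⟨m, rfl⟩ : ∃ m : Nat, minSize = (m : Int) := ⟨minSize.toNat, by omega⟩
  have hm : 1 ≤ m := by exact_mod_cast h1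
  have hmn : m ≤ s.toList.length := by exact_mod_cast h2
  have hne : ∀ k ∈ List.range (s.toList.length - m + 1), pvWin s.toList m k ≠ [] := by
    intro k hk he
    have hk' := List.mem_range.mp hk
    have hlen : (pvWin s.toList m k).length = min m (s.toList.length - k) := by
      simp [pvWin]
    rw [he] at hlen
    simp only [List.length_nil] at hlen
    omega
  -- A's loop, rebased to natural window indices with the seed split off
  have hA : maxFreq s maxLetters (m : Int) maxSize
      = pvMv (((List.range (s.toList.length - m + 1)).foldl
          (pvAstep s.toList maxLetters m) PySem.Dict.empty).values) := by
    simp only [maxFreq]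
    rw [show ((s.toList.length : Int) - (m : Int) + 1)
        = ((s.toList.length - m + 1 : Nat) : Int) by omega]
    rw [PySem.List.pyRange_zero_natCast, List.foldl_map]
    have hstep : ∀ (d : PySem.Dict String Int) (k : Nat), k ∈ List.range (s.toList.length - m + 1) →
        (if ((PySem.Set.ofList (PySem.List.slice s.toList (some (k : Int)) (some ((k : Int) + (m : Int))))).length : Int) > maxLetters then d
         else d.insert (String.ofList (PySem.List.slice s.toList (some (k : Int)) (some ((k : Int) + (m : Int)))))
           (d.getD (String.ofList (PySem.List.slice s.toList (some (k : Int)) (some ((k : Int) + (m : Int))))) 0 + 1))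
        = pvAstep s.toList maxLetters m d k := by
      intro d k _
      simp only [pvAstep, pvWin]
      rw [PySem.List.slice_natCast_add]
    rw [PySem.List.foldl_congr_mem _ _ _ _ hstep]
    rw [show (PySem.Dict.ofList [(("" : String), (0 : Int))])
        = PySem.Dict.mk (("", 0) :: (PySem.Dict.empty : PySem.Dict String Int).items) from rfl]
    rw [pvPad s.toList maxLetters m _ hne PySem.Dict.empty]
    rw [show (PySem.Dict.mk (("", (0:Int)) :: ((List.range (s.toList.length - m + 1)).foldl
          (pvAstep s.toList maxLetters m) PySem.Dict.empty).items)).values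
        = 0 :: ((List.range (s.toList.length - m + 1)).foldl
          (pvAstep s.toList maxLetters m) PySem.Dict.empty).values from rfl]
    rw [PySem.List.max?_id_cons]
    rfl
  rw [hA]
  -- B's side
  simp only [maxFreq_alt]
  rw [if_neg (by
    have hsl : s.toList.length = s.length := by simp
    simp
    omega)]
  rw [PySem.List.slice_to_natCast, PySem.List.slice_from_natCast]
  rw [show PySem.List.slice s.toList (some 0) (some (m : Int))
      = List.take m s.toList by
        rw [PySem.List.slice_zero_start, PySem.List.slice_to_natCast]]
  obtain ⟨hf0, hd0⟩ := pvFirstWin (List.take m s.toList)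
  rw [hd0]
  -- the seedless A fold, split at window 0
  rw [List.range_eq_range', List.range'_succ, List.foldl_cons]
  have hf0' : ∀ c : Char, ((List.take m s.toList).foldl (fun (p : PySem.Dict Char Int × Int) c =>
      (p.1.insert c (p.1.getD c 0 + 1), if p.1.getD c 0 == 0 then p.2 + 1 else p.2))
      (PySem.Dict.empty, 0)).1.getD c 0 = ((pvWin s.toList m 0).count c : Int) := by
    intro c; rw [pvWin0]; exact hf0 c
  by_cases hq0 : (((List.take m s.toList).toFinset.card : Nat) : Int) ≤ maxLetters
  · rw [if_pos hq0]
    have hA0 : pvAstep s.toList maxLetters m PySem.Dict.empty 0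
        = (PySem.Dict.empty : PySem.Dict String Int).insert
            (String.ofList (List.take m s.toList))
            ((PySem.Dict.empty : PySem.Dict String Int).getD (String.ofList (List.take m s.toList)) 0 + 1) := by
      unfold pvAstep
      rw [if_neg (by rw [pvSetLen, pvWin0]; omega), pvWin0]
    rw [← hA0]
    have hbv : ((PySem.Dict.empty : PySem.Dict String Int).getD (String.ofList (List.take m s.toList)) 0 + 1)
        = pvMv ((pvAstep s.toList maxLetters m PySem.Dict.empty 0).values) := by
      rw [hA0]
      simp [PySem.Dict.insert, PySem.Dict.contains, PySem.Dict.empty, PySem.Dict.values,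
        PySem.Dict.getD, PySem.Dict.get?, pvMv]
    rw [hbv]
    have hnd0 : (pvAstep s.toList maxLetters m PySem.Dict.empty 0).keys.Nodup := by
      rw [hA0]
      exact PySem.Dict.nodup_keys_insert _ _ _ PySem.Dict.nodup_keys_empty
    have := pvBloop s.toList maxLetters m hm hmn (s.toList.length - m) 0 (by omega)
      _ _ _ _ hf0' (by rw [pvWin0]) hnd0 rfl
    simpa using this.symm
  · rw [if_neg hq0]
    have hA0 : pvAstep s.toList maxLetters m PySem.Dict.empty 0 = PySem.Dict.empty := by
      unfold pvAstep
      rw [if_pos (by rw [pvSetLen, pvWin0]; omega)]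
    rw [hA0]
    have := pvBloop s.toList maxLetters m hm hmn (s.toList.length - m) 0 (by omega)
      _ _ PySem.Dict.empty 0 hf0' (by rw [pvWin0]) PySem.Dict.nodup_keys_empty (by rfl)
    simpa using this.symm

-- A returns 0 when minSize > len(s) (empty range) — B's guard returns 0 too
lemma pvLarge (s : String) (maxLetters minSize maxSize : Int)
    (h2 : (s.toList.length : Int) < minSize) :
    maxFreq s maxLetters minSize maxSize = 0 := by
  simp only [maxFreq]
  rw [show PySem.List.pyRange 0 ((s.toList.length : Int) - minSize + 1) 1 = [] by
    have hsl : s.toList.length = s.length := by simp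
    simp [PySem.List.pyRange]
    omega]
  rfl

-- A returns 0 when maxLetters < 0 (every window is skipped)
lemma pvNegML (s : String) (maxLetters minSize maxSize : Int) (h : maxLetters < 0) :
    maxFreq s maxLetters minSize maxSize = 0 := by
  simp only [maxFreq]
  rw [PySem.List.foldl_congr_mem _ _ (fun d _ => d) _
    (by
      intro acc j _
      rw [if_pos]
      have := Int.natCast_nonneg (PySem.Set.ofList (PySem.List.slice s.toList (some j) (some (j + minSize)))).length
      omega)]
  rw [PySem.List.foldl_ignore]
  rfl

lemma pvAltZero (s : String) (maxLetters minSize maxSize : Int) (h : minSize < 1) :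
    maxFreq_alt s maxLetters minSize maxSize = 0 := by
  unfold maxFreq_alt
  simp only [h, decide_true, Bool.true_or, if_true]

lemma pvAltZeroLarge (s : String) (maxLetters minSize maxSize : Int)
    (h : (s.toList.length : Int) < minSize) :
    maxFreq_alt s maxLetters minSize maxSize = 0 := by
  unfold maxFreq_alt
  simp only [h, decide_true, Bool.or_true, if_true]

-- a dict whose "" entry is ≥ 1 has max of values ≥ 1
lemma pvMaxGe (d : PySem.Dict String Int) (h : 1 ≤ d.getD "" 0) :
    1 ≤ (match PySem.List.max? d.values (fun v => v) with | some m => m | none => 0) := by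
  obtain ⟨w, hw⟩ : ∃ w, d.get? "" = some w := by
    cases hq : d.get? "" with
    | none =>
      rw [PySem.Dict.getD_eq_get?_getD, hq] at h
      simp at h
    | some w => exact ⟨w, rfl⟩
  have hw1 : 1 ≤ w := by
    rw [PySem.Dict.getD_eq_get?_getD, hw] at h
    simpa using h
  have hwv : w ∈ d.values := by
    simp only [PySem.Dict.get?] at hw
    obtain ⟨p, hp1, hp2⟩ := Option.map_eq_some_iff.mp hw
    exact hp2 ▸ List.mem_map_of_mem (List.mem_of_find?_eq_some hp1)
  cases hv : d.values with
  | nil => rw [hv] at hwv; simp at hwv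
  | cons x t =>
    rw [hv] at hwv
    rw [PySem.List.max?_id_cons]
    show (1:Int) ≤ List.foldl max x t
    rcases List.mem_cons.mp hwv with rfl | hwt
    · have := (PySem.List.le_foldl_max t w).1
      omega
    · have := (PySem.List.le_foldl_max t x).2 w hwt
      omega

-- the value at key "" never decreases along A's loop
lemma pvMono (cs : List Char) (maxLetters minSize : Int) (js : List Int) :
    ∀ d : PySem.Dict String Int,
    d.getD "" 0 ≤ (js.foldl (fun d j =>
        if ((PySem.Set.ofList (PySem.List.slice cs (some j) (some (j + minSize)))).length : Int) > maxLetters then d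
        else d.insert (String.ofList (PySem.List.slice cs (some j) (some (j + minSize))))
          (d.getD (String.ofList (PySem.List.slice cs (some j) (some (j + minSize)))) 0 + 1)) d).getD "" 0 := by
  induction js with
  | nil => intro d; simp
  | cons j t ih =>
    intro d
    refine le_trans ?_ (ih _)
    simp only [List.foldl_cons]
    split_ifs with hc
    · exact le_refl _
    · rw [PySem.Dict.getD_insert]
      split_ifs with he
      · rw [← he]; omega
      · exact le_refl _

-- inside D_, A returns at least 1
lemma pvApos (s : String) (maxLetters minSize maxSize : Int)
    (h1 : minSize ≤ 0) (h2 : 0 ≤ maxLetters) :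
    1 ≤ maxFreq s maxLetters minSize maxSize := by
  simp only [maxFreq]
  have hmem : -minSize ∈ PySem.List.pyRange 0 ((s.toList.length : Int) - minSize + 1) 1 := by
    rw [PySem.List.mem_pyRange_one]
    have := Int.natCast_nonneg s.toList.length
    omega
  obtain ⟨u, v, hsplit⟩ := List.append_of_mem hmem
  rw [hsplit, List.foldl_append, List.foldl_cons]
  -- the step at j = -minSize increments the "" entry
  have hchunk : PySem.List.slice s.toList (some (-minSize)) (some (-minSize + minSize)) = [] := by
    rw [show -minSize + minSize = (0:Int) by ring]
    rw [PySem.List.slice_toNat _ (by omega) (by omega)]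
    simp
  have hkey : String.ofList ([] : List Char) = "" := rfl
  have hgd1 : ∀ d : PySem.Dict String Int, 0 ≤ d.getD "" 0 →
      (1:Int) ≤ ((if ((PySem.Set.ofList (PySem.List.slice s.toList (some (-minSize)) (some (-minSize + minSize)))).length : Int) > maxLetters then d
        else d.insert (String.ofList (PySem.List.slice s.toList (some (-minSize)) (some (-minSize + minSize))))
          (d.getD (String.ofList (PySem.List.slice s.toList (some (-minSize)) (some (-minSize + minSize)))) 0 + 1))).getD "" 0 := by
    intro d hd0
    rw [hchunk, hkey]
    rw [if_neg (by simp; omega)]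
    rw [PySem.Dict.getD_insert]
    rw [if_pos rfl]
    omega
  have hseed : (PySem.Dict.ofList [(("" : String), (0 : Int))]).getD "" 0 = 0 := by decide
  have h0 : (0:Int) ≤ (u.foldl (fun d j =>
      if ((PySem.Set.ofList (PySem.List.slice s.toList (some j) (some (j + minSize)))).length : Int) > maxLetters then d
      else d.insert (String.ofList (PySem.List.slice s.toList (some j) (some (j + minSize))))
        (d.getD (String.ofList (PySem.List.slice s.toList (some j) (some (j + minSize)))) 0 + 1))
      (PySem.Dict.ofList [("", 0)])).getD "" 0 := by
    have := pvMono s.toList maxLetters minSize u (PySem.Dict.ofList [("", 0)])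
    omega
  have hfin : (1:Int) ≤ ((u ++ -minSize :: v).foldl (fun d j =>
      if ((PySem.Set.ofList (PySem.List.slice s.toList (some j) (some (j + minSize)))).length : Int) > maxLetters then d
      else d.insert (String.ofList (PySem.List.slice s.toList (some j) (some (j + minSize))))
        (d.getD (String.ofList (PySem.List.slice s.toList (some j) (some (j + minSize)))) 0 + 1))
      (PySem.Dict.ofList [("", 0)])).getD "" 0 := by
    rw [List.foldl_append, List.foldl_cons]
    refine le_trans (hgd1 _ h0) (pvMono s.toList maxLetters minSize v _)
  rw [List.foldl_append, List.foldl_cons] at hfin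
  exact pvMaxGe _ hfin

-- ===== VERDICT (by name: the statement is the Claim_ definition above) =====
theorem maxFreq_spec : Claim_unchanged_maxFreq := by
  intro s maxLetters minSize maxSize _ hD
  unfold D_maxFreq at hD
  rcases lt_or_ge minSize 1 with hlt | hge
  · rcases lt_or_ge maxLetters 0 with hml | hml
    · rw [pvNegML s maxLetters minSize maxSize hml, pvAltZero s maxLetters minSize maxSize hlt]
    · exact absurd ⟨by omega, hml⟩ hD
  · rcases le_or_gt minSize (s.toList.length : Int) with hle | hgt
    · exact pvMain s maxLetters minSize maxSize hge hle
    · rw [pvLarge s maxLetters minSize maxSize hgt,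
          pvAltZeroLarge s maxLetters minSize maxSize hgt]

theorem maxFreq_changed : Claim_changed_maxFreq := by
  unfold Claim_changed_maxFreq; decide

theorem maxFreq_tight : Claim_exact_maxFreq := by
  intro s maxLetters minSize maxSize _ hD
  rcases hD with ⟨h1, h2⟩
  have ha := pvApos s maxLetters minSize maxSize h1 h2
  rw [pvAltZero s maxLetters minSize maxSize (by omega)]
  omega
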